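-- pv_equiv track=rewrite | github.com/flux-abyss/orthos-packager | debcraft/expert/compat.py | _descending_prefixes
-- ===== SOURCE A (Python) =====
-- def _descending_prefixes(symbol: str, min_len: int = 3) -> list[str]:
--     """Return underscore-joined left-to-right prefixes of *symbol*, longest first.
--
--     Only prefixes whose total assembled length is at least *min_len* characters
--     are included (avoids matching on trivially short tokens like 'e' or 'x').
--
--     Examples
--     --------
--     >>> _descending_prefixes('ecore_x_io_error_display_still_there_get')
--     ['ecore_x_io_error_display_still_there', ..., 'ecore_x', 'ecore']
--
--     >>> _descending_prefixes('evas_object_event_rects_set')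
--     ['evas_object_event_rects', 'evas_object_event', 'evas_object', 'evas']
--     """
--     parts = symbol.split("_")
--     prefixes: list[str] = []
--     for i in range(len(parts) - 1, 0, -1):   # longest slice first
--         prefix = "_".join(parts[:i])
--         if len(prefix) >= min_len:
--             prefixes.append(prefix)
--     return prefixes
-- ===== SOURCE B (Python) =====
-- def _descending_prefixes(symbol: str, min_len: int = 3) -> list[str]:
--     positions = [i for i, c in enumerate(symbol) if c == "_"]
--     prefixes: list[str] = []
--     for p in reversed(positions):
--         if p >= min_len:
--             prefixes.append(symbol[:p])
--     return prefixes
-- ===== Notes on version B (the rewrite author's own statement) =====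
-- stated objective: alternative
-- what changed: Instead of splitting on the underscore separator and re-joining a shrinking prefix of the parts list for every candidate, B scans the string once to collect the underscore positions and emits each kept prefix as one direct string slice up to that position.
import Mathlib
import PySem

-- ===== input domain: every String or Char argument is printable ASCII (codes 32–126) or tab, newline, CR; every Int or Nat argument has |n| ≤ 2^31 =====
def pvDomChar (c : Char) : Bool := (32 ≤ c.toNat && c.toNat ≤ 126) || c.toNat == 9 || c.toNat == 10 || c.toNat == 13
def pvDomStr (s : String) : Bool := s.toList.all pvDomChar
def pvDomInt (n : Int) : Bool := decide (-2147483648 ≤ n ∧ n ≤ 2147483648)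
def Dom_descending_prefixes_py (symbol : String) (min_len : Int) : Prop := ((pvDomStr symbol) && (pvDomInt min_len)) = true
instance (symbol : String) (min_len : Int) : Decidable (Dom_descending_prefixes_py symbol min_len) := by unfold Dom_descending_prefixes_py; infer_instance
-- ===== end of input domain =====

-- B replaces A's split-then-rejoin-per-prefix pass by one scan collecting the underscore
-- positions plus a direct slice per kept prefix (alternative decomposition; proved equal below).

-- ===== PORT A =====
def descending_prefixes_py (symbol : String) (min_len : Int) : List String :=
  let parts := (PySem.Str.split? symbol "_").getD []   -- sep "_" is nonempty, split? is some here
  (PySem.List.pyRange ((parts.length : Int) - 1) 0 (-1)).foldl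
    (fun prefixes i =>
      let pfx := PySem.Str.join "_" (PySem.List.slice parts none (some i))
      if min_len ≤ PySem.Str.len pfx then prefixes ++ [pfx] else prefixes) []

-- ===== PORT B =====
def descending_prefixes_py_alt (symbol : String) (min_len : Int) : List String :=
  let positions := ((PySem.List.enumerate symbol.toList).filter (fun ic => ic.2 == '_')).map Prod.fst
  positions.reverse.foldl
    (fun prefixes p =>
      if min_len ≤ p then prefixes ++ [PySem.Str.slice symbol none (some p)] else prefixes) []

-- ===== PRECONDITION & SPEC =====
def Spec_descending_prefixes_py (symbol : String) (min_len : Int) (out : List String) : Prop := out = descending_prefixes_py_alt symbol min_len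
instance (symbol : String) (min_len : Int) (out : List String) : Decidable (Spec_descending_prefixes_py symbol min_len out) := by unfold Spec_descending_prefixes_py; infer_instance

-- ===== CLAIM (what is proved, stated in full; the proofs are below) =====
def Claim_equal_descending_prefixes_py : Prop := ∀ (symbol : String) (min_len : Int), Dom_descending_prefixes_py symbol min_len → Spec_descending_prefixes_py symbol min_len (descending_prefixes_py symbol min_len)

-- ===== LEMMAS AND PROOFS =====

def pvSp (pre : List Char) : List Char → List (List Char)
  | [] => [pre]
  | c :: rest => if c = '_' then pre :: pvSp [] rest else pvSp (pre ++ [c]) rest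

theorem pvGo_eq (l : List Char) : ∀ (fuel : Nat) (cur : List Char) (acc : List (List Char)) (_ : l.length ≤ fuel),
    PySem.Chars.splitOn.go ['_'] fuel l cur acc = acc.reverse ++ pvSp cur.reverse l := by
  induction l with
  | nil =>
    intro fuel cur acc _
    cases fuel <;> simp [PySem.Chars.splitOn.go, pvSp]
  | cons c rest ih =>
    intro fuel cur acc h
    cases fuel with
    | zero => simp at h
    | succ f =>
      by_cases hc : c = '_'
      · subst hc
        rw [PySem.Chars.splitOn.go]
        simp [List.isPrefixOf, ih f [] (cur.reverse :: acc) (by simpa using h), pvSp]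
      · rw [PySem.Chars.splitOn.go]
        have : List.isPrefixOf ['_'] (c :: rest) = false := by
          simp [List.isPrefixOf]; exact fun e => hc e.symm
        simp [this, ih f (c :: cur) acc (by simpa using h), pvSp, hc]

theorem pvSplitOn_eq (cs : List Char) : PySem.Chars.splitOn cs ['_'] = pvSp [] cs := by
  have := pvGo_eq cs (cs.length + 1) [] [] (by omega)
  simpa [PySem.Chars.splitOn] using this

def pvPos : List Char → List Nat
  | [] => []
  | c :: rest => (if c = '_' then [0] else []) ++ (pvPos rest).map (· + 1)

theorem pvSp_length (cs : List Char) : ∀ pre, (pvSp pre cs).length = (pvPos cs).length + 1 := by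
  induction cs with
  | nil => intro pre; simp [pvSp, pvPos]
  | cons c rest ih =>
    intro pre
    by_cases hc : c = '_' <;> simp [pvSp, pvPos, hc, ih]

theorem pvPos_lt (cs : List Char) : ∀ j (h : j < (pvPos cs).length), (pvPos cs)[j] < cs.length := by
  induction cs with
  | nil => simp [pvPos]
  | cons c rest ih =>
    intro j h
    by_cases hc : c = '_'
    · simp [pvPos, hc] at h ⊢
      cases j with
      | zero => simp
      | succ j' =>
        have := ih j' (by simpa using h)
        simp
        omega
    · simp [pvPos, hc] at h ⊢
      have := ih j (by simpa using h)
      simp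
      omega

theorem pvJoin_cons (a : List Char) (l : List (List Char)) (h : l ≠ []) :
    PySem.Chars.join ['_'] (a :: l) = a ++ '_' :: PySem.Chars.join ['_'] l := by
  cases l with
  | nil => simp at h
  | cons b r => rw [PySem.Chars.join_cons_cons]; simp

theorem pvSp_join (cs : List Char) : ∀ pre j (h : j < (pvPos cs).length),
    PySem.Chars.join ['_'] ((pvSp pre cs).take (j + 1)) = pre ++ cs.take ((pvPos cs)[j]) := by
  induction cs with
  | nil => simp [pvPos]
  | cons c rest ih =>
    intro pre j h
    by_cases hc : c = '_'
    · subst hc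
      cases j with
      | zero => simp [pvSp, pvPos, PySem.Chars.join_singleton]
      | succ j' =>
        have hj' : j' < (pvPos rest).length := by simp [pvPos] at h; omega
        have hne : (pvSp [] rest).take (j' + 1) ≠ [] := by
          have hlen := pvSp_length rest []
          intro e
          have h0 : ((pvSp [] rest).take (j' + 1)).length = 0 := by rw [e]; rfl
          rw [List.length_take, hlen] at h0
          omega
        rw [show pvSp pre ('_' :: rest) = pre :: pvSp [] rest by simp [pvSp]]
        rw [List.take_succ_cons, pvJoin_cons _ _ hne, ih [] j' hj']
        try simp [pvPos]
    · have hj : j < (pvPos rest).length := by simp [pvPos, hc] at h; omega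
      rw [show pvSp pre (c :: rest) = pvSp (pre ++ [c]) rest by simp [pvSp, hc]]
      rw [ih (pre ++ [c]) j hj]
      simp [pvPos, hc]


theorem pvEnum_pos (cs : List Char) : ∀ (a : Int),
    ((PySem.List.enumerate cs a).filter (fun ic => ic.2 == '_')).map Prod.fst
      = (pvPos cs).map (fun (n : Nat) => a + (n : Int)) := by
  induction cs with
  | nil => intro a; simp [PySem.List.enumerate, pvPos]
  | cons c rest ih =>
    intro a
    by_cases hc : c = '_' <;>
      simp [PySem.List.enumerate, pvPos, hc, ih (a + 1)] <;>
      (intro x _; push_cast; ring)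


theorem pvRange_down (k : Nat) :
    PySem.List.pyRange (k : Int) 0 (-1) = (List.range k).map (fun (j : Nat) => (k : Int) - (j : Int)) := by
  rcases Nat.eq_zero_or_pos k with h | h
  · subst h; simp [PySem.List.pyRange]
  · have hk : (0:Int) < k := by exact_mod_cast h
    simp only [PySem.List.pyRange]
    norm_num [hk, not_lt.mpr hk.le]
    simp [if_pos h, sub_eq_add_neg]

theorem pvFoldIf {α : Type} (f : α → String) (a : α → Int) (m : Int) (l : List α) :
    l.foldl (fun acc x => if m ≤ a x then acc ++ [f x] else acc) [] =
      List.map f (l.filter (fun x => decide (m ≤ a x))) := by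
  have h := PySem.List.foldl_append_if (fun x => decide (m ≤ a x)) f l []
  simpa using h

theorem pvPairTrick {α : Type} (f : α → String) (a : α → Int) (m : Int) (l : List α) :
    List.map f (l.filter (fun x => decide (m ≤ a x))) =
      List.map Prod.fst ((l.map (fun x => (f x, a x))).filter (fun y => decide (m ≤ y.2))) := by
  rw [List.filter_map, List.map_map]
  rfl

theorem pvSplit_some (symbol : String) :
    ∃ partsS : List String, PySem.Str.split? symbol "_" = some partsS ∧
      List.map String.toList partsS = pvSp [] symbol.toList := by
  have h := PySem.Str.split?_map symbol "_"
  have h2 : PySem.Chars.split? symbol.toList ("_" : String).toList = some (pvSp [] symbol.toList) := by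
    rw [PySem.Chars.split?]
    simp [show ("_" : String).toList = ['_'] from rfl, pvSplitOn_eq]
  rw [h2] at h
  cases hx : PySem.Str.split? symbol "_" with
  | none => rw [hx] at h; simp at h
  | some partsS => rw [hx] at h; simp at h; exact ⟨partsS, rfl, h⟩

theorem descending_prefixes_main (symbol : String) (min_len : Int) :
    descending_prefixes_py symbol min_len = descending_prefixes_py_alt symbol min_len := by
  obtain ⟨partsS, hps, htl⟩ := pvSplit_some symbol
  have hlenS : partsS.length = (pvPos symbol.toList).length + 1 := by
    have h1 := pvSp_length symbol.toList []
    rw [← htl] at h1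
    simpa using h1
  -- A side
  simp only [descending_prefixes_py]
  simp only [hps, Option.getD_some, hlenS]
  rw [show (((pvPos symbol.toList).length + 1 : Nat) : Int) - 1 = ((pvPos symbol.toList).length : Int) by push_cast; ring]
  rw [pvRange_down (pvPos symbol.toList).length]
  rw [pvFoldIf (fun i => PySem.Str.join "_" (PySem.List.slice partsS none (some i)))
        (fun i => PySem.Str.len (PySem.Str.join "_" (PySem.List.slice partsS none (some i)))) min_len]
  rw [pvPairTrick]
  -- B side
  simp only [descending_prefixes_py_alt]
  simp only [pvEnum_pos symbol.toList 0]
  rw [pvFoldIf (fun p => PySem.Str.slice symbol none (some p)) (fun p => p) min_len]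
  rw [pvPairTrick (fun p => PySem.Str.slice symbol none (some p)) (fun p => p) min_len]
  simp only [zero_add]
  congr 1
  congr 1
  apply List.ext_getElem
  · simp
  · intro j h1 h2
    have hj : j < (pvPos symbol.toList).length := by simpa using h1
    have hj' : (pvPos symbol.toList).length - 1 - j < (pvPos symbol.toList).length := by omega
    have hul := pvPos_lt symbol.toList ((pvPos symbol.toList).length - 1 - j) hj'
    have hchars : (PySem.Str.join "_" (PySem.List.slice partsS none
          (some (((pvPos symbol.toList).length : Int) - (j : Int))))).toList
        = symbol.toList.take ((pvPos symbol.toList)[(pvPos symbol.toList).length - 1 - j]'hj') := by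
      rw [show (((pvPos symbol.toList).length : Int) - (j : Int))
            = (((pvPos symbol.toList).length - j : Nat) : Int) by omega]
      rw [PySem.Str.toList_join, PySem.List.slice_to_natCast, List.map_take, htl]
      rw [show ("_" : String).toList = ['_'] from rfl]
      rw [show (pvPos symbol.toList).length - j = ((pvPos symbol.toList).length - 1 - j) + 1 by omega]
      rw [pvSp_join symbol.toList [] ((pvPos symbol.toList).length - 1 - j) hj']
      simp
    simp only [List.getElem_map, List.getElem_range, List.getElem_reverse, List.length_map]
    refine Prod.ext ?_ ?_
    · simp only []
      apply String.toList_injective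
      rw [hchars, PySem.Str.toList_slice]
      simp only [PySem.Chars.slice]
      rw [PySem.List.slice_to_natCast]
    · simp only []
      rw [PySem.Str.len_eq, hchars, List.length_take]
      rw [Nat.min_eq_left (le_of_lt hul)]

-- ===== VERDICT (by name: the statement is the Claim_ definition above) =====
theorem descending_prefixes_py_spec : Claim_equal_descending_prefixes_py := by
  intro symbol min_len _
  unfold Spec_descending_prefixes_py
  exact descending_prefixes_main symbol min_len
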